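-- pv_equiv track=rewrite | github.com/Eli-Kurtz/Advent | 2019_four.py | count
-- ===== SOURCE A (Python) =====
-- def count(array):
--
--     x = 0
--     n = len(array)
--     clean_array = []
--     while x < n:
--         for i in range(10):
--             if array[x].count(i) == 2:
--                 clean_array.append(array[x])
--         x += 1
--     return clean_array
-- ===== SOURCE B (Python) =====
-- def count(array):
--     clean_array = []
--     for element in array:
--         s = sorted(element)
--         k = 0
--         i = 0
--         n = len(s)
--         while i < n:
--             j = i + 1
--             while j < n and s[j] == s[i]:
--                 j += 1
--             if j - i == 2 and 0 <= s[i] <= 9: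
--                 k += 1
--             i = j
--         clean_array += [element] * k
--     return clean_array
-- ===== Notes on version B (the rewrite author's own statement) =====
-- stated objective: alternative
-- what changed: B sorts each element and counts maximal runs of equal values (length exactly 2, value in 0..9) in one linear scan of the sorted copy, instead of probing range(10) with ten .count scans per element.
import Mathlib
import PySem

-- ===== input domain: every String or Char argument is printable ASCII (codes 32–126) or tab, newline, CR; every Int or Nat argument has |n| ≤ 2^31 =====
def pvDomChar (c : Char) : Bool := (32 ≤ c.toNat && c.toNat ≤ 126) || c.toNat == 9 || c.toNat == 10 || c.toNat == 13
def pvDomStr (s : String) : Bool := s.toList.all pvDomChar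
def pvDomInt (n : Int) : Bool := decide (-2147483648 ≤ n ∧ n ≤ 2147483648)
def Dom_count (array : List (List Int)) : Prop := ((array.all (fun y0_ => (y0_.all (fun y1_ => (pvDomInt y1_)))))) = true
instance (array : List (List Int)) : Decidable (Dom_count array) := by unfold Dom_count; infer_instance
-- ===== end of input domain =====

-- B sorts each element and counts runs of length exactly 2 with value in 0..9 in one
-- scan of the sorted copy, instead of ten per-digit .count probes (alternative algorithm).

-- ===== PORT A =====
def count (array : List (List Int)) : List (List Int) :=
  (PySem.List.pyRange 0 (PySem.List.len array) 1).foldl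
    (fun clean x =>
      (PySem.List.pyRange 0 10 1).foldl
        (fun clean i =>
          if ((PySem.List.pyGetD array x []).count i : Int) == 2 then
            clean ++ [PySem.List.pyGetD array x []]
          else clean)
        clean)
    []

-- ===== PORT B =====
-- the inner while loop of Source B: scan the sorted list run by run
def countRuns : List Int → Nat
  | [] => 0
  | v :: rest =>
    (if (rest.takeWhile (fun w => w == v)).length = 1 ∧ 0 ≤ v ∧ v ≤ 9 then 1 else 0)
      + countRuns (rest.dropWhile (fun w => w == v))
termination_by s => s.length
decreasing_by
  have := List.length_dropWhile_le (fun w => w == v) rest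
  simp only [List.length_cons]
  omega

def count_alt (array : List (List Int)) : List (List Int) :=
  array.foldl
    (fun clean element =>
      clean ++ List.replicate (countRuns (PySem.List.sorted element (fun x => x) false)) element)
    []

-- ===== PRECONDITION & SPEC =====
def Spec_count (array : List (List Int)) (out : List (List Int)) : Prop := out = count_alt array
instance (array : List (List Int)) (out : List (List Int)) : Decidable (Spec_count array out) := by unfold Spec_count; infer_instance

-- ===== CLAIM (what is proved, stated in full; the proofs are below) =====
def Claim_equal_count : Prop := ∀ (array : List (List Int)), Dom_count array → Spec_count array (count array)

-- ===== LEMMAS AND PROOFS =====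

-- per element: the number of digits 0..9 occurring exactly twice equals the number of
-- distinct in-range values with count 2
lemma klen (elt : List Int) :
    ((PySem.List.pyRange 0 10 1).filter (fun i => ((elt.count i : Int) == 2))).length
    = ((PySem.Set.ofList elt).filter (fun k => decide (0 ≤ k) && decide (k ≤ 9) && (((elt.count k : Int)) == 2))).length := by
  apply List.Perm.length_eq
  rw [List.perm_ext_iff_of_nodup
    ((PySem.List.nodup_pyRange_one 0 10).filter _)
    ((PySem.Set.nodup_ofList elt).filter _)]
  intro a
  simp only [List.mem_filter, PySem.List.mem_pyRange_one, PySem.Set.mem_ofList,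
    Bool.and_eq_true, beq_iff_eq, decide_eq_true_eq]
  constructor
  · rintro ⟨⟨h0, h10⟩, hc⟩
    have : 0 < elt.count a := by omega
    exact ⟨List.count_pos_iff.mp this, ⟨h0, by omega⟩, hc⟩
  · rintro ⟨_, ⟨h0, h9⟩, hc⟩
    exact ⟨⟨h0, by omega⟩, hc⟩

-- run-scan on a sorted list = number of distinct in-range values with count 2
lemma runs_eq_aux (n : Nat) : ∀ (s : List Int), s.length ≤ n → s.Pairwise (· ≤ ·) →
    countRuns s
      = ((PySem.Set.ofList s).filter
          (fun k => decide (0 ≤ k) && decide (k ≤ 9) && (((s.count k : Int)) == 2))).length := by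
  induction n with
  | zero =>
    intro s hl _
    have hnil : s = [] := List.eq_nil_of_length_eq_zero (Nat.le_zero.mp hl)
    subst hnil
    simp [countRuns, PySem.Set.ofList]
  | succ n ih =>
    intro s hl hs
    match s with
    | [] => simp [countRuns, PySem.Set.ofList]
    | v :: rest =>
      simp only [List.length_cons] at hl
      set t := rest.takeWhile (fun w => w == v) with ht
      set r := rest.dropWhile (fun w => w == v) with hr
      have hsplit : rest = t ++ r := (List.takeWhile_append_dropWhile).symm
      have htv : ∀ x ∈ t, x = v := by
        intro x hx
        have := List.mem_takeWhile_imp hx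
        simpa using this
      have hvle : ∀ x ∈ rest, v ≤ x := fun x hx => List.rel_of_pairwise_cons hs hx
      have hrest : rest.Pairwise (· ≤ ·) := hs.of_cons
      have hrp : r.Pairwise (· ≤ ·) := hrest.sublist (List.dropWhile_sublist _)
      have hrsub : ∀ x ∈ r, x ∈ rest := fun x hx => (List.dropWhile_sublist _).mem hx
      have hvr : ∀ x ∈ r, v < x := by
        intro x hx
        match hre : r, hx with
        | w :: r', hx =>
          have hne : List.dropWhile (fun w => w == v) rest ≠ [] := by
            rw [← hr]; simp
          have hwf := List.head_dropWhile_not (fun w => w == v) (l := rest) hne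
          have hhead : (List.dropWhile (fun w => w == v) rest).head hne = w := by
            have h2 : (List.dropWhile (fun w => w == v) rest).head? = some w := by
              rw [← hr]; rfl
            rw [List.head?_eq_some_head hne] at h2
            exact Option.some.inj h2
          rw [hhead] at hwf
          have hwv : w ≠ v := by simpa using hwf
          have hvw : v < w := lt_of_le_of_ne (hvle w (hrsub w (by simp))) (Ne.symm hwv)
          rcases List.mem_cons.mp hx with hxw | hx'
          · exact hxw ▸ hvw
          · have : w ≤ x := List.rel_of_pairwise_cons (hre ▸ hrp) hx'
            omega
      have hvnr : v ∉ r := fun h => lt_irrefl v (hvr v h)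
      have htc : t.count v = t.length := List.count_eq_length.mpr (fun b hb => by
        simpa using (htv b hb).symm)
      have hcv : (v :: rest).count v = 1 + t.length := by
        rw [List.count_cons_self, hsplit, List.count_append, htc,
          List.count_eq_zero.mpr hvnr]
        omega
      have hck : ∀ k ∈ r, (v :: rest).count k = r.count k := by
        intro k hk
        have hkv : k ≠ v := fun h => lt_irrefl v (h ▸ hvr k hk)
        have htk : t.count k = 0 := List.count_eq_zero.mpr (fun h => hkv (htv k h))
        rw [List.count_cons_of_ne (Ne.symm hkv), hsplit, List.count_append, htk]
        omega
      have hlenr : r.length ≤ n := by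
        have := List.length_dropWhile_le (fun w => w == v) rest
        rw [← hr] at this
        omega
      have hIH := ih r hlenr hrp
      have hperm : (PySem.Set.ofList (v :: rest)).Perm (v :: PySem.Set.ofList r) := by
        refine (List.perm_ext_iff_of_nodup (PySem.Set.nodup_ofList _) ?_).mpr ?_
        · exact List.Nodup.cons (by simpa [PySem.Set.mem_ofList] using hvnr)
            (PySem.Set.nodup_ofList _)
        · intro a
          simp only [PySem.Set.mem_ofList, List.mem_cons, hsplit, List.mem_append]
          constructor
          · rintro (h | h | h)
            · exact Or.inl h
            · exact Or.inl (htv a h)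
            · exact Or.inr (by simpa [PySem.Set.mem_ofList] using h)
          · rintro (h | h)
            · exact Or.inl h
            · exact Or.inr (Or.inr (by simpa [PySem.Set.mem_ofList] using h))
      have h1 : ((PySem.Set.ofList (v :: rest)).filter
            (fun k => decide (0 ≤ k) && decide (k ≤ 9) && ((((v :: rest).count k : Int)) == 2))).length
          = ((v :: PySem.Set.ofList r).filter
            (fun k => decide (0 ≤ k) && decide (k ≤ 9) && ((((v :: rest).count k : Int)) == 2))).length :=
        (hperm.filter _).length_eq
      have hcong : (PySem.Set.ofList r).filter
            (fun k => decide (0 ≤ k) && decide (k ≤ 9) && ((((v :: rest).count k : Int)) == 2))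
          = (PySem.Set.ofList r).filter
            (fun k => decide (0 ≤ k) && decide (k ≤ 9) && (((r.count k : Int)) == 2)) := by
        refine List.filter_congr (fun a ha => ?_)
        rw [hck a (by simpa [PySem.Set.mem_ofList] using ha)]
      rw [countRuns, h1, List.filter_cons, hcong, ← ht, ← hr]
      by_cases hC : t.length = 1 ∧ 0 ≤ v ∧ v ≤ 9
      · have hb : (decide (0 ≤ v) && decide (v ≤ 9) && ((((v :: rest).count v : Int)) == 2)) = true := by
          rw [hcv]
          simp only [Bool.and_eq_true, decide_eq_true_eq, beq_iff_eq]
          refine ⟨⟨hC.2.1, hC.2.2⟩, ?_⟩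
          have := hC.1
          push_cast
          omega
        rw [if_pos hC, if_pos hb, List.length_cons, hIH]
        omega
      · have hb : (decide (0 ≤ v) && decide (v ≤ 9) && ((((v :: rest).count v : Int)) == 2)) = false := by
          rw [hcv]
          by_contra hcon
          rw [Bool.not_eq_false] at hcon
          simp only [Bool.and_eq_true, decide_eq_true_eq, beq_iff_eq] at hcon
          obtain ⟨⟨h0, h9⟩, h2⟩ := hcon
          exact hC ⟨by omega, h0, h9⟩
        rw [if_neg hC, hb]
        simp [hIH]

-- per element: the run scan of the sorted copy agrees with A's ten-digit probe count
lemma key_eq (elt : List Int) :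
    countRuns (PySem.List.sorted elt (fun x => x) false)
    = ((PySem.List.pyRange 0 10 1).filter (fun i => ((elt.count i : Int) == 2))).length := by
  have hp : (PySem.List.sorted elt (fun x => x) false).Perm elt := PySem.List.sorted_perm elt _ _
  have hpair : (PySem.List.sorted elt (fun x => x) false).Pairwise (· ≤ ·) :=
    PySem.List.sorted_pairwise elt _
  rw [runs_eq_aux (PySem.List.sorted elt (fun x => x) false).length _ le_rfl hpair, klen]
  have h1 : (PySem.Set.ofList (PySem.List.sorted elt (fun x => x) false)).filter
        (fun k => decide (0 ≤ k) && decide (k ≤ 9) &&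
          ((((PySem.List.sorted elt (fun x => x) false).count k : Int)) == 2))
      = (PySem.Set.ofList (PySem.List.sorted elt (fun x => x) false)).filter
        (fun k => decide (0 ≤ k) && decide (k ≤ 9) && (((elt.count k : Int)) == 2)) :=
    List.filter_congr (fun a _ => by rw [hp.count_eq])
  rw [h1]
  exact (((List.perm_ext_iff_of_nodup (PySem.Set.nodup_ofList _) (PySem.Set.nodup_ofList _)).mpr
    (fun a => by simp only [PySem.Set.mem_ofList, hp.mem_iff])).filter _).length_eq.symm

lemma body_eq (clean : List (List Int)) (elt : List Int) :
    (PySem.List.pyRange 0 10 1).foldl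
      (fun clean i => if ((elt.count i : Int) == 2) then clean ++ [elt] else clean) clean
    = clean ++ List.replicate (countRuns (PySem.List.sorted elt (fun x => x) false)) elt := by
  rw [PySem.List.foldl_append_if (fun i => ((elt.count i : Int) == 2)) (fun _ => elt)]
  rw [List.map_const', key_eq]

-- ===== VERDICT (by name: the statement is the Claim_ definition above) =====
theorem count_spec : Claim_equal_count := by
  intro array _
  show count array = count_alt array
  unfold count count_alt
  rw [PySem.List.foldl_pyRange_zero_pyGetD array []
    (fun clean elt =>
      (PySem.List.pyRange 0 10 1).foldl
        (fun clean i => if ((elt.count i : Int) == 2) then clean ++ [elt] else clean) clean) []]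
  exact PySem.List.foldl_congr_mem _ _ _ _ (fun acc x _ => body_eq acc x)
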